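-- pv_equiv track=rewrite | github.com/AnAverageHuman/competitive | acmgnyr2020/e.py | do
-- ===== SOURCE A (Python) =====
-- from typing import Tuple
--
-- def do(p, q, N, M) -> str:
--     def check(sum) -> Tuple[bool, int]:
--         if (p * sum * (sum - 1)) % q != 0:
--             return False, 0
--         for x in range(1, (sum + 1) // 2 + 1):
--             if 2 * x * (sum - x) == (p * sum * (sum - 1)) // q:
--                 return True, x
--
--         return False, 0
--
--     for sum in range(N, M + 1):
--         boole, x = check(sum)
--         if not boole:
--             continue
--
--         return f"{x} {sum - x}"
--
--     return "NO SOLUTION"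
-- ===== SOURCE B (Python) =====
-- from math import isqrt
--
-- def do(p, q, N, M) -> str:
--     # Solve 2x(s-x) = p*s*(s-1)//q directly: x = (s - sqrt(s^2 - 2K))/2, smaller root first.
--     for s in range(N, M + 1):
--         num = p * s * (s - 1)
--         if num % q != 0:
--             continue
--         K = num // q
--         disc = s * s - 2 * K
--         if disc < 0:
--             continue
--         r = isqrt(disc)
--         if r * r != disc or (s - r) % 2 != 0:
--             continue
--         x1 = (s - r) // 2
--         x2 = (s + r) // 2
--         half = (s + 1) // 2
--         if 1 <= x1 <= half:
--             return f"{x1} {s - x1}"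
--         if 1 <= x2 <= half:
--             return f"{x2} {s - x2}"
--     return "NO SOLUTION"
-- ===== Notes on version B (the rewrite author's own statement) =====
-- stated objective: faster
-- what changed: B replaces A's inner linear scan over x=1..(s+1)//2 by solving the quadratic 2x(s-x)=K in closed form with math.isqrt, checking the two roots directly.
import Mathlib
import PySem

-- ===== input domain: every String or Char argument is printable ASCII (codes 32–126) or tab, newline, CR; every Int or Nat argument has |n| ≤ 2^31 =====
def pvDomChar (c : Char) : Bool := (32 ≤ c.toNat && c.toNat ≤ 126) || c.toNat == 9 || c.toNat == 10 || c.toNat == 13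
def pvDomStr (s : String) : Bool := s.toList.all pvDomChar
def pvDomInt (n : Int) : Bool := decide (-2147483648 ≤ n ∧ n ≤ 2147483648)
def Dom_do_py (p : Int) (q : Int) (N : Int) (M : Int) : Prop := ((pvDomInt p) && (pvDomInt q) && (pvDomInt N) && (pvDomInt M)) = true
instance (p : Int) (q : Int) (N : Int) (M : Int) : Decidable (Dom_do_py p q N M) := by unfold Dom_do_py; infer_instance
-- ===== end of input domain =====

-- B replaces A's inner linear scan over x by solving the quadratic 2x(s-x)=K in closed form via integer sqrt (measured faster).


-- ===== PORT A =====
-- A's inner 'check' loop: scan x = 1 .. m, first x with 2*x*(s-x) = K (early return, like Python's for)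
def do_py_findx (s : Int) (K : Int) (x : Int) (m : Int) : Option Int :=
  if _h : x ≤ m then
    if 2 * x * (s - x) = K then some x else do_py_findx s K (x + 1) m
  else none
termination_by (m + 1 - x).toNat
decreasing_by omega

def do_py_check (p : Int) (q : Int) (s : Int) : Bool × Int :=
  if PySem.Int.mod (p * s * (s - 1)) q ≠ 0 then (false, 0)
  else
    match do_py_findx s (PySem.Int.floordiv (p * s * (s - 1)) q) 1 (PySem.Int.floordiv (s + 1) 2) with
    | some x => (true, x)
    | none => (false, 0)

-- A's outer loop over sum = N .. M with early return
def do_py_loop (p : Int) (q : Int) (s : Int) (M : Int) : String :=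
  if _h : s ≤ M then
    match do_py_check p q s with
    | (true, x) => PySem.Int.toStr x ++ " " ++ PySem.Int.toStr (s - x)
    | (false, _) => do_py_loop p q (s + 1) M
  else "NO SOLUTION"
termination_by (M + 1 - s).toNat
decreasing_by omega

def do_py (p : Int) (q : Int) (N : Int) (M : Int) : String :=
  do_py_loop p q N M

-- ===== PORT B =====
-- B's per-sum step: closed-form roots x = (s ∓ isqrt(s²-2K))/2, smaller root tried first (isqrt ported as Nat.sqrt)
def do_py_alt_step (p : Int) (q : Int) (s : Int) : Option Int :=
  let num := p * s * (s - 1)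
  if PySem.Int.mod num q ≠ 0 then none
  else
    let K := PySem.Int.floordiv num q
    let disc := s * s - 2 * K
    if disc < 0 then none
    else
      let r : Int := (Nat.sqrt disc.toNat : Int)
      if r * r ≠ disc ∨ PySem.Int.mod (s - r) 2 ≠ 0 then none
      else
        let x1 := PySem.Int.floordiv (s - r) 2
        let x2 := PySem.Int.floordiv (s + r) 2
        let half := PySem.Int.floordiv (s + 1) 2
        if 1 ≤ x1 ∧ x1 ≤ half then some x1
        else if 1 ≤ x2 ∧ x2 ≤ half then some x2
        else none

def do_py_alt_loop (p : Int) (q : Int) (s : Int) (M : Int) : String :=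
  if _h : s ≤ M then
    match do_py_alt_step p q s with
    | some x => PySem.Int.toStr x ++ " " ++ PySem.Int.toStr (s - x)
    | none => do_py_alt_loop p q (s + 1) M
  else "NO SOLUTION"
termination_by (M + 1 - s).toNat
decreasing_by omega

def do_py_alt (p : Int) (q : Int) (N : Int) (M : Int) : String :=
  do_py_alt_loop p q N M

-- ===== PRECONDITION & SPEC =====
-- Pre_ excludes q = 0 with a nonempty sum range, where Python A (and B alike) raise ZeroDivisionError.
def Pre_do_py (p : Int) (q : Int) (N : Int) (M : Int) : Prop := q ≠ 0 ∨ M < N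
instance (p : Int) (q : Int) (N : Int) (M : Int) : Decidable (Pre_do_py p q N M) := by unfold Pre_do_py; infer_instance
def pvWitness_do_py : Int × Int × Int × Int := (1, 2, 1, 6)

def Spec_do_py (p : Int) (q : Int) (N : Int) (M : Int) (out : String) : Prop := out = do_py_alt p q N M
instance (p : Int) (q : Int) (N : Int) (M : Int) (out : String) : Decidable (Spec_do_py p q N M out) := by unfold Spec_do_py; infer_instance

-- ===== CLAIM (what is proved, stated in full; the proofs are below) =====
def Claim_equal_do_py : Prop := ∀ (p : Int) (q : Int) (N : Int) (M : Int), Dom_do_py p q N M → Pre_do_py p q N M → Spec_do_py p q N M (do_py p q N M)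

-- ===== LEMMAS AND PROOFS =====

-- the predicate A scans with, characterised as a square condition
lemma quad_char (s K x : Int) :
    (2 * x * (s - x) = K) ↔ (s - 2 * x) ^ 2 = s * s - 2 * K := by
  have hid : (s - 2 * x) ^ 2 = s * s - 2 * (2 * x * (s - x)) := by ring
  constructor <;> intro h <;> linarith [hid]

lemma sqrt_hit {d : Int} (e : Int) (he : e * e = d) :
    ((Nat.sqrt d.toNat : Int)) = |e| := by
  have h0 : 0 ≤ d := by nlinarith [sq_nonneg e]
  have h1 : d.toNat = e.natAbs * e.natAbs := by
    have := Int.natAbs_mul_self (a := e)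
    omega
  rw [h1]
  have h2 : Nat.sqrt (e.natAbs * e.natAbs) = e.natAbs := by
    simp [← pow_two, Nat.sqrt_eq' e.natAbs]
  rw [h2, Int.abs_eq_natAbs]

-- main inner lemma: A's first-hit scan over x equals B's closed-form candidate choice
lemma find_quad (s K : Int) :
    List.find? (fun x => 2 * x * (s - x) == K) (PySem.List.pyRange 1 (PySem.Int.floordiv (s + 1) 2 + 1) 1) =
      (if s * s - 2 * K < 0 then none
       else if (Nat.sqrt (s * s - 2 * K).toNat : Int) * (Nat.sqrt (s * s - 2 * K).toNat : Int) ≠ s * s - 2 * K ∨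
               PySem.Int.mod (s - (Nat.sqrt (s * s - 2 * K).toNat : Int)) 2 ≠ 0 then none
       else if 1 ≤ PySem.Int.floordiv (s - (Nat.sqrt (s * s - 2 * K).toNat : Int)) 2 ∧
               PySem.Int.floordiv (s - (Nat.sqrt (s * s - 2 * K).toNat : Int)) 2 ≤ PySem.Int.floordiv (s + 1) 2 then
         some (PySem.Int.floordiv (s - (Nat.sqrt (s * s - 2 * K).toNat : Int)) 2)
       else if 1 ≤ PySem.Int.floordiv (s + (Nat.sqrt (s * s - 2 * K).toNat : Int)) 2 ∧
               PySem.Int.floordiv (s + (Nat.sqrt (s * s - 2 * K).toNat : Int)) 2 ≤ PySem.Int.floordiv (s + 1) 2 then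
         some (PySem.Int.floordiv (s + (Nat.sqrt (s * s - 2 * K).toNat : Int)) 2)
       else none) := by
  have hfd : ∀ a : Int, PySem.Int.floordiv a 2 = a / 2 := fun a => PySem.Int.floordiv_eq_ediv_of_pos (by omega)
  have hmd : ∀ a : Int, PySem.Int.mod a 2 = a % 2 := fun a => PySem.Int.mod_eq_emod_of_pos (by omega)
  simp only [hfd, hmd]
  set disc := s * s - 2 * K with hdisc
  set r : Int := (Nat.sqrt disc.toNat : Int) with hrdef
  have hr0 : 0 ≤ r := by positivity
  have hP : ∀ x : Int, ((2 * x * (s - x) == K) = true) ↔ (s - 2 * x) ^ 2 = disc := by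
    intro x
    rw [beq_iff_eq, hdisc]
    exact quad_char s K x
  by_cases hneg : disc < 0
  · rw [if_pos hneg]
    apply List.find?_eq_none.2
    intro x _ hPx
    have := (hP x).1 hPx
    nlinarith [sq_nonneg (s - 2 * x)]
  · rw [if_neg hneg]
    by_cases hbad : r * r ≠ disc ∨ (s - r) % 2 ≠ 0
    · rw [if_pos hbad]
      apply List.find?_eq_none.2
      intro x _ hPx
      have hsq := (hP x).1 hPx
      have he : (s - 2 * x) * (s - 2 * x) = disc := by nlinarith [hsq]
      have habs : r = |s - 2 * x| := sqrt_hit (s - 2 * x) he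
      have hrr : r * r = disc := by
        rcases abs_cases (s - 2 * x) with ⟨h1, _⟩ | ⟨h1, _⟩ <;> rw [habs, h1] <;> nlinarith [he]
      have hpar : (s - r) % 2 = 0 := by
        rcases abs_cases (s - 2 * x) with ⟨h1, _⟩ | ⟨h1, _⟩ <;> rw [habs, h1] <;> omega
      rcases hbad with hb | hb <;> exact hb (by assumption)
    · rw [if_neg hbad]
      rw [not_or, not_ne_iff, not_ne_iff] at hbad
      obtain ⟨hrr, hpar⟩ := hbad
      have hPiff : ∀ x : Int, ((2 * x * (s - x) == K) = true) ↔ (x = (s - r) / 2 ∨ x = (s + r) / 2) := by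
        intro x
        rw [hP x]
        constructor
        · intro hsq
          have hfac : (s - 2 * x - r) * (s - 2 * x + r) = 0 := by linear_combination hsq - hrr
          rcases mul_eq_zero.1 hfac with h | h <;> omega
        · rintro (h | h)
          · subst h
            have h2 : s - 2 * ((s - r) / 2) = r := by omega
            rw [h2, sq]; exact hrr
          · subst h
            have h2 : s - 2 * ((s + r) / 2) = -r := by omega
            rw [h2]
            calc (-r) ^ 2 = r * r := by ring
              _ = disc := hrr
      have hx12 : (s - r) / 2 ≤ (s + r) / 2 := by omega
      by_cases hc1 : 1 ≤ (s - r) / 2 ∧ (s - r) / 2 ≤ (s + 1) / 2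
      · rw [if_pos hc1]
        rw [PySem.List.pyRange_one_append 1 ((s - r) / 2) ((s + 1) / 2 + 1) (by omega) (by omega)]
        rw [List.find?_append]
        have h1 : List.find? (fun x => 2 * x * (s - x) == K) (PySem.List.pyRange 1 ((s - r) / 2) 1) = none := by
          apply List.find?_eq_none.2
          intro y hy hPy
          rw [PySem.List.mem_pyRange_one] at hy
          rcases (hPiff y).1 hPy with h | h <;> omega
        rw [h1]
        rw [PySem.List.pyRange_one_cons (by omega : (s - r) / 2 < (s + 1) / 2 + 1)]
        have hPx : ((fun x => 2 * x * (s - x) == K) ((s - r) / 2)) = true := (hPiff _).2 (Or.inl rfl)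
        simp [hPx]
      · rw [if_neg hc1]
        by_cases hc2 : 1 ≤ (s + r) / 2 ∧ (s + r) / 2 ≤ (s + 1) / 2
        · rw [if_pos hc2]
          have hx1lt : (s - r) / 2 < 1 := by omega
          rw [PySem.List.pyRange_one_append 1 ((s + r) / 2) ((s + 1) / 2 + 1) (by omega) (by omega)]
          rw [List.find?_append]
          have h1 : List.find? (fun x => 2 * x * (s - x) == K) (PySem.List.pyRange 1 ((s + r) / 2) 1) = none := by
            apply List.find?_eq_none.2
            intro y hy hPy
            rw [PySem.List.mem_pyRange_one] at hy
            rcases (hPiff y).1 hPy with h | h <;> omega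
          rw [h1]
          rw [PySem.List.pyRange_one_cons (by omega : (s + r) / 2 < (s + 1) / 2 + 1)]
          have hPx : ((fun x => 2 * x * (s - x) == K) ((s + r) / 2)) = true := (hPiff _).2 (Or.inr rfl)
          simp [hPx]
        · rw [if_neg hc2]
          apply List.find?_eq_none.2
          intro y hy hPy
          rw [PySem.List.mem_pyRange_one] at hy
          rcases (hPiff y).1 hPy with h | h <;> omega

-- the recursive scan is List.find? over the corresponding range
lemma findx_eq (s K x m : Int) :
    do_py_findx s K x m = List.find? (fun y => 2 * y * (s - y) == K) (PySem.List.pyRange x (m + 1) 1) := by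
  by_cases h : x ≤ m
  · rw [do_py_findx, dif_pos h, PySem.List.pyRange_one_cons (by omega)]
    by_cases hp : 2 * x * (s - x) = K
    · have hpb : (2 * x * (s - x) == K) = true := beq_iff_eq.2 hp
      simp [List.find?, hp]
    · have hpb : (2 * x * (s - x) == K) = false := by simp [hp]
      simp [List.find?, hp, hpb, findx_eq s K (x + 1) m]
  · rw [do_py_findx, dif_neg h, PySem.List.pyRange_one_eq_nil (by omega)]
    simp
termination_by (m + 1 - x).toNat
decreasing_by omega

-- per-sum equivalence of the two ports' step functions
lemma step_eq (p q s : Int) :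
    do_py_check p q s =
      (match do_py_alt_step p q s with
       | some x => (true, x)
       | none => (false, 0)) := by
  unfold do_py_check do_py_alt_step
  by_cases hm : PySem.Int.mod (p * s * (s - 1)) q ≠ 0
  · simp [hm]
  · simp only [hm, if_false]
    rw [findx_eq, find_quad s (PySem.Int.floordiv (p * s * (s - 1)) q)]

lemma loop_eq (p q s M : Int) : do_py_loop p q s M = do_py_alt_loop p q s M := by
  by_cases h : s ≤ M
  · rw [do_py_loop, do_py_alt_loop, dif_pos h, dif_pos h, step_eq]
    cases do_py_alt_step p q s <;> simp [loop_eq p q (s + 1) M]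
  · rw [do_py_loop, do_py_alt_loop, dif_neg h, dif_neg h]
termination_by (M + 1 - s).toNat
decreasing_by omega

-- ===== VERDICT (by name: the statement is the Claim_ definition above) =====
theorem do_py_spec : Claim_equal_do_py := by
  intro p q N M _ _
  unfold Spec_do_py do_py do_py_alt
  exact loop_eq p q N M
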